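-- pv_equiv track=rewrite | github.com/jdrtommey/adiabatic_evolution | hohi/floquet/.ipynb_checkpoints/floquet-checkpoint.py | gen_h1_row
-- ===== SOURCE A (Python) =====
-- def gen_h1_row(A,num_blocks,block_id):
--     """
--     generates a list made of either A or None,
--     """
--     block_list = []
--     for i in range(num_blocks):
--         if i == block_id - 1 and i >=0:
--             block_list.append(A)
--         elif i == block_id + 1 and i < num_blocks:
--                 block_list.append(A)
--         else:
--             block_list.append(None)
--     return block_list
-- ===== SOURCE B (Python) =====
-- def gen_h1_row(A, num_blocks, block_id):
--     """
--     generates a list made of either A or None,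
--     """
--     block_list = [None] * max(num_blocks, 0)
--     for j in (block_id - 1, block_id + 1):
--         if 0 <= j < num_blocks:
--             block_list[j] = A
--     return block_list
-- ===== Notes on version B (the rewrite author's own statement) =====
-- stated objective: simpler
-- what changed: Instead of looping over every index and testing it against the two neighbor positions, B default-fills the list with None once ([None]*n) and directly patches the (at most two) in-range neighbor positions block_id-1 and block_id+1.
import Mathlib
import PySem

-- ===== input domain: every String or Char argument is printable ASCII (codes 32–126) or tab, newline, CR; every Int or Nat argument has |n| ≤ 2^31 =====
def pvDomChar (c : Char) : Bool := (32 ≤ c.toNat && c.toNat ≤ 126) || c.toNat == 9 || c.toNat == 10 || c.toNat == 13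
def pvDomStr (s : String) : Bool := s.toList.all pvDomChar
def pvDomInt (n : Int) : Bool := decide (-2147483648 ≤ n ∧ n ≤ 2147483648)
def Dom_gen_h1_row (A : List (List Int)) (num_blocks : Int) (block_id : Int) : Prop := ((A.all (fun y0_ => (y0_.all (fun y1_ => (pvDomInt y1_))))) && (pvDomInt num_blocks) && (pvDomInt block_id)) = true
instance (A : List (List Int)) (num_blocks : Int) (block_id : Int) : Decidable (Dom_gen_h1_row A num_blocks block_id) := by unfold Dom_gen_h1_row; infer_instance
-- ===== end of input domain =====

-- B builds the row by default-filling with None and patching the two in-range neighbor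
-- positions directly, instead of A's per-index loop with branch tests (objective: simpler).

-- ===== PORT A =====
def gen_h1_row (A : List (List Int)) (num_blocks : Int) (block_id : Int) : List (Option (List (List Int))) :=
  (PySem.List.pyRange 0 num_blocks 1).foldl
    (fun block_list i =>
      if i = block_id - 1 ∧ 0 ≤ i then block_list ++ [some A]
      else if i = block_id + 1 ∧ i < num_blocks then block_list ++ [some A]
      else block_list ++ [none]) []

-- ===== PORT B =====
-- loop body of B: overwrite position j with A when 0 <= j < num_blocks
def pvPatch (l : List (Option (List (List Int)))) (num_blocks j : Int) (A : List (List Int)) : List (Option (List (List Int))) :=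
  if 0 ≤ j ∧ j < num_blocks then l.set j.toNat (some A) else l

def gen_h1_row_alt (A : List (List Int)) (num_blocks : Int) (block_id : Int) : List (Option (List (List Int))) :=
  pvPatch (pvPatch (List.replicate (max num_blocks 0).toNat none) num_blocks (block_id - 1) A)
    num_blocks (block_id + 1) A

-- ===== PRECONDITION & SPEC =====
def Spec_gen_h1_row (A : List (List Int)) (num_blocks : Int) (block_id : Int) (out : List (Option (List (List Int)))) : Prop := out = gen_h1_row_alt A num_blocks block_id
instance (A : List (List Int)) (num_blocks : Int) (block_id : Int) (out : List (Option (List (List Int)))) : Decidable (Spec_gen_h1_row A num_blocks block_id out) := by unfold Spec_gen_h1_row; infer_instance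

-- ===== CLAIM (what is proved, stated in full; the proofs are below) =====
def Claim_equal_gen_h1_row : Prop := ∀ (A : List (List Int)) (num_blocks : Int) (block_id : Int), Dom_gen_h1_row A num_blocks block_id → Spec_gen_h1_row A num_blocks block_id (gen_h1_row A num_blocks block_id)

-- ===== LEMMAS AND PROOFS =====

theorem foldl_append_map {α β : Type} (f : α → β) :
    ∀ (l : List α) (init : List β),
      l.foldl (fun acc i => acc ++ [f i]) init = init ++ l.map f := by
  intro l
  induction l with
  | nil => intro init; simp
  | cons x xs ih => intro init; simp [List.foldl, ih]

theorem gen_h1_row_eq_map (A : List (List Int)) (num_blocks : Int) (block_id : Int) :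
    gen_h1_row A num_blocks block_id =
      (List.range num_blocks.toNat).map
        (fun (k : Nat) =>
          if (k : Int) = block_id - 1 ∧ 0 ≤ (k : Int) then some A
          else if (k : Int) = block_id + 1 ∧ (k : Int) < num_blocks then some A
          else none) := by
  unfold gen_h1_row
  have hfun : (fun (block_list : List (Option (List (List Int)))) (i : Int) =>
      if i = block_id - 1 ∧ 0 ≤ i then block_list ++ [some A]
      else if i = block_id + 1 ∧ i < num_blocks then block_list ++ [some A]
      else block_list ++ [none]) =
      fun acc i => acc ++ [if i = block_id - 1 ∧ 0 ≤ i then some A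
        else if i = block_id + 1 ∧ i < num_blocks then some A else none] := by
    funext acc i; split_ifs <;> rfl
  rw [hfun, PySem.List.pyRange_one, foldl_append_map, List.map_map]
  simp only [Function.comp_def, zero_add, Int.sub_zero, List.nil_append]

theorem gen_h1_row_spec' (A : List (List Int)) (num_blocks : Int) (block_id : Int) :
    gen_h1_row A num_blocks block_id = gen_h1_row_alt A num_blocks block_id := by
  rw [gen_h1_row_eq_map]
  unfold gen_h1_row_alt pvPatch
  have hlen : (max num_blocks 0).toNat = num_blocks.toNat := by omega
  apply List.ext_getElem
  · split_ifs <;> simp [hlen]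
  · intro k h1 h2
    have hk : k < num_blocks.toNat := by simpa using h1
    simp only [List.getElem_map, List.getElem_range]
    split_ifs with hc1 hc2 <;>
      simp only [List.getElem_set, List.getElem_replicate] <;>
      first | rfl | omega | (split_ifs <;> first | rfl | omega)

-- ===== VERDICT (by name: the statement is the Claim_ definition above) =====
theorem gen_h1_row_spec : Claim_equal_gen_h1_row := by
  intro A n b _
  exact gen_h1_row_spec' A n b
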